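-- pv_equiv track=rewrite | github.com/lucyyutingli/Monopoly | helper_functions.py | new_roll_dict
-- ===== SOURCE A (Python) =====
-- from collections import defaultdict
--
-- def new_roll_dict(roll_list):
--     player_roll_defaultdict = defaultdict(list)
--
--     for i in roll_list:
--         player_roll_defaultdict[i[0]].append(i[1])
--
--     player_roll_dict = (player_roll_defaultdict)
--     player_roll_new_dict = defaultdict(list)
--
--     for i in sorted(player_roll_dict.keys(), reverse=True):
--         player_roll_new_dict[i].append(player_roll_dict.get(i))
--     return player_roll_new_dict
-- ===== SOURCE B (Python) =====
-- from collections import defaultdict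
--
-- def new_roll_dict(roll_list):
--     # Sort once (stable, descending by player key), then collect each run of
--     # equal keys in a single pass.
--     ordered = sorted(roll_list, key=lambda p: p[0], reverse=True)
--     result = defaultdict(list)
--     pending = None  # (key, values of the current run)
--     for key, value in ordered:
--         if pending is not None and key == pending[0]:
--             pending[1].append(value)
--         else:
--             if pending is not None:
--                 result[pending[0]].append(pending[1])
--             pending = (key, [value])
--     if pending is not None:
--         result[pending[0]].append(pending[1])
--     return result
-- ===== Notes on version B (the rewrite author's own statement) =====
-- stated objective: alternative
-- what changed: Instead of grouping into a dict first and then sorting the keys, B stably sorts the pair list descending by key once and collects runs of equal keys in a single pass, inserting each run into the result as it completes.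
import Mathlib
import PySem

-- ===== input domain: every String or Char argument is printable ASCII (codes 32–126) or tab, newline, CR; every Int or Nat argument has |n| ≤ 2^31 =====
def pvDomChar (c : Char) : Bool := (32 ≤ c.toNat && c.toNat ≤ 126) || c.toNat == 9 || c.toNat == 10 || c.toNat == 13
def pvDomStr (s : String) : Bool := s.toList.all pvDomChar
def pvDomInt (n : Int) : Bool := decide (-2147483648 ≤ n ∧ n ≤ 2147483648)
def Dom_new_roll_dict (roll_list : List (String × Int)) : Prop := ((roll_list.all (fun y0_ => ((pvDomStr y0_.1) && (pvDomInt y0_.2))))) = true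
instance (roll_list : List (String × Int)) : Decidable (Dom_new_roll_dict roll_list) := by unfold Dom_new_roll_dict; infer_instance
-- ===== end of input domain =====

-- B groups by a single stable descending sort plus a one-pass run scan, instead of A's
-- dict-grouping pass followed by a key sort and a rebuild loop (alternative decomposition,
-- same complexity); equal return value everywhere.

-- ===== PORT A =====
def new_roll_dict (roll_list : List (String × Int)) : List (String × List (List Int)) :=
  -- first loop: player_roll_defaultdict[i[0]].append(i[1])
  let d : PySem.Dict String (List Int) :=
    roll_list.foldl (fun d i => d.modify i.1 [] (fun l => l ++ [i.2])) PySem.Dict.empty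
  -- second loop over sorted(keys, reverse=True); `player_roll_dict.get(i)` is looked up at a
  -- key of the dict itself, so it is exactly the stored list: getD with default [] is exact here
  let nd : PySem.Dict String (List (List Int)) :=
    (PySem.List.sorted d.keys (fun x => x) true).foldl
      (fun nd k => nd.modify k [] (fun l => l ++ [d.getD k []])) PySem.Dict.empty
  nd.items

-- ===== PORT B =====
-- loop body of Source B: state = (result dict, pending run `(key, values)` or None)
def pvStep (st : PySem.Dict String (List (List Int)) × Option (String × List Int))
    (p : String × Int) : PySem.Dict String (List (List Int)) × Option (String × List Int) :=
  match st.2 with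
  | some pe =>
      if p.1 == pe.1 then (st.1, some (pe.1, pe.2 ++ [p.2]))
      else (st.1.modify pe.1 [] (fun l => l ++ [pe.2]), some (p.1, [p.2]))
  | none => (st.1, some (p.1, [p.2]))

def new_roll_dict_alt (roll_list : List (String × Int)) : List (String × List (List Int)) :=
  let ordered := PySem.List.sorted roll_list (fun p => p.1) true
  let st := ordered.foldl pvStep (PySem.Dict.empty, none)
  (match st.2 with
   | some pe => st.1.modify pe.1 [] (fun l => l ++ [pe.2])
   | none => st.1).items

-- ===== PRECONDITION & SPEC =====
def Spec_new_roll_dict (roll_list : List (String × Int)) (out : List (String × List (List Int))) : Prop := out = new_roll_dict_alt roll_list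
instance (roll_list : List (String × Int)) (out : List (String × List (List Int))) : Decidable (Spec_new_roll_dict roll_list out) := by unfold Spec_new_roll_dict; infer_instance

-- ===== CLAIM (what is proved, stated in full; the proofs are below) =====
def Claim_equal_new_roll_dict : Prop := ∀ (roll_list : List (String × Int)), Dom_new_roll_dict roll_list → Spec_new_roll_dict roll_list (new_roll_dict roll_list)

-- ===== LEMMAS AND PROOFS =====

-- descending blocks: for each key (in the given order) the pairs of xs carrying it, in order
def pvBlocks (xs : List (String × Int)) (ks : List String) : List (String × Int) :=
  ks.flatMap (fun k => xs.filter (fun p => p.1 == k))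

def pvFlush (st : PySem.Dict String (List (List Int)) × Option (String × List Int)) :
    PySem.Dict String (List (List Int)) :=
  match st.2 with
  | some pe => st.1.modify pe.1 [] (fun l => l ++ [pe.2])
  | none => st.1

lemma pvInsertBy_cons {α : Type} (before : α → α → Bool) (x y : α) (ys : List α) :
    PySem.List.insertBy before x (y :: ys) =
      if before x y then x :: y :: ys else y :: PySem.List.insertBy before x ys := rfl

lemma pvInsertBy_all_true {α : Type} (before : α → α → Bool) (x : α) (l : List α)
    (h : ∀ y ∈ l, before x y = true) : PySem.List.insertBy before x l = x :: l := by
  cases l with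
  | nil => rfl
  | cons y ys => rw [pvInsertBy_cons, if_pos (h y (by simp))]

lemma pvInsertBy_append_not {α : Type} (before : α → α → Bool) (x : α) (l₁ l₂ : List α)
    (h : ∀ y ∈ l₁, before x y = false) :
    PySem.List.insertBy before x (l₁ ++ l₂) = l₁ ++ PySem.List.insertBy before x l₂ := by
  induction l₁ with
  | nil => rfl
  | cons y ys ih =>
      rw [List.cons_append, pvInsertBy_cons, if_neg (by simp [h y (by simp)]),
        ih (fun z hz => h z (by simp [hz])), List.cons_append]

lemma pvBlocks_fst_mem (xs : List (String × Int)) (ks : List String) (y : String × Int)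
    (hy : y ∈ pvBlocks xs ks) : y.1 ∈ ks := by
  simp only [pvBlocks, List.mem_flatMap, List.mem_filter] at hy
  obtain ⟨k, hk, _, hfst⟩ := hy
  simpa [show y.1 = k from by simpa using hfst] using hk

lemma pvBlocks_append_notmem (xs : List (String × Int)) (x : String × Int) (ks : List String)
    (hx : x.1 ∉ ks) : pvBlocks (xs ++ [x]) ks = pvBlocks xs ks := by
  induction ks with
  | nil => rfl
  | cons k ks ih =>
      have hk : (x.1 == k) = false := by
        simpa using fun h => hx (by simp [h])
      simp only [pvBlocks, List.flatMap_cons] at *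
      rw [List.filter_append, ih (fun h => hx (by simp [h]))]
      simp [List.filter, hk]

lemma pvInsertBy_blocks (xs : List (String × Int)) (x : String × Int) (ks : List String)
    (hdesc : ks.Pairwise (fun a b => b < a))
    (hnew : x.1 ∉ ks → xs.filter (fun p => p.1 == x.1) = []) :
    PySem.List.insertBy (fun a b : String × Int => decide (b.1 < a.1)) x (pvBlocks xs ks) =
      if x.1 ∈ ks then pvBlocks (xs ++ [x]) ks
      else pvBlocks (xs ++ [x]) (PySem.List.insertBy (fun a b : String => decide (b < a)) x.1 ks) := by
  induction ks with
  | nil =>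
      have h0 : xs.filter (fun p => p.1 == x.1) = [] := hnew (by simp)
      simp [pvBlocks, PySem.List.insertBy, List.filter_append, h0]
  | cons k ks ih =>
      have htail : ks.Pairwise (fun a b => b < a) := hdesc.tail
      have hlt : ∀ b ∈ ks, b < k := fun b hb => List.rel_of_pairwise_cons hdesc hb
      have hkne : k ∉ ks := fun h => absurd (hlt k h) (lt_irrefl k)
      have hblk : ∀ y ∈ xs.filter (fun p => p.1 == k), y.1 = k :=
        fun y hy => by simpa using (List.mem_filter.mp hy).2
      rcases lt_trichotomy x.1 k with hx | hx | hx
      · -- x.1 < k : skip the k-block and recurse into the tail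
        have hxk : (x.1 == k) = false := by simpa using ne_of_lt hx
        have hnew' : x.1 ∉ ks → xs.filter (fun p => p.1 == x.1) = [] :=
          fun h => hnew (by simp [ne_of_lt hx, h])
        have hskip : ∀ y ∈ xs.filter (fun p => p.1 == k),
            (decide (y.1 < x.1)) = false :=
          fun y hy => decide_eq_false (by rw [hblk y hy]; exact not_lt_of_gt hx)
        simp only [pvBlocks, List.flatMap_cons] at *
        rw [pvInsertBy_append_not _ _ _ _ hskip, ih htail hnew']
        by_cases hmem : x.1 ∈ ks
        · rw [if_pos hmem, if_pos (by simp [hmem])]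
          rw [List.filter_append]
          simp [List.filter, hxk]
        · rw [if_neg hmem, if_neg (by simp [ne_of_lt hx, hmem])]
          rw [pvInsertBy_cons, if_neg (by simpa using not_lt_of_gt hx), List.flatMap_cons]
          rw [List.filter_append]
          simp [List.filter, hxk]
      · -- x.1 = k : x goes to the end of the k-block
        have hskip : ∀ y ∈ xs.filter (fun p => p.1 == k),
            (decide (y.1 < x.1)) = false :=
          fun y hy => decide_eq_false (by rw [hblk y hy, hx]; exact lt_irrefl k)
        have hall : ∀ y ∈ pvBlocks xs ks, (decide ((y : String × Int).1 < x.1)) = true :=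
          fun y hy => decide_eq_true (by rw [hx]; exact hlt y.1 (pvBlocks_fst_mem xs ks y hy))
        rw [if_pos (by simp [hx])]
        simp only [pvBlocks, List.flatMap_cons] at *
        rw [pvInsertBy_append_not _ _ _ _ hskip, pvInsertBy_all_true _ _ _ hall]
        have h2 := pvBlocks_append_notmem xs x ks (by rw [hx]; exact hkne)
        simp only [pvBlocks] at h2
        rw [List.filter_append, h2]
        simp [List.filter, hx]
      · -- k < x.1 : x starts a new first block
        have hxs : x.1 ∉ k :: ks := by
          simp only [List.mem_cons]
          rintro (h | h)
          · exact absurd h (ne_of_gt hx)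
          · exact absurd (lt_trans (hlt _ h) hx) (lt_irrefl x.1)
        have h0 : xs.filter (fun p => p.1 == x.1) = [] := hnew hxs
        have hall : ∀ y ∈ pvBlocks xs (k :: ks),
            (decide ((y : String × Int).1 < x.1)) = true := by
          intro y hy
          have := pvBlocks_fst_mem xs (k :: ks) y hy
          rcases List.mem_cons.mp this with h | h
          · exact decide_eq_true (h ▸ hx)
          · exact decide_eq_true (lt_trans (hlt _ h) hx)
        rw [if_neg hxs, pvInsertBy_all_true _ _ _ hall,
          pvInsertBy_cons, if_pos (by simpa using hx)]
        rw [show pvBlocks (xs ++ [x]) (x.1 :: k :: ks)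
            = (xs ++ [x]).filter (fun p => p.1 == x.1) ++ pvBlocks (xs ++ [x]) (k :: ks) from by
          simp [pvBlocks],
          pvBlocks_append_notmem xs x (k :: ks) hxs, List.filter_append]
        simp [List.filter, h0]

lemma pvSorted_blocks (xs : List (String × Int)) :
    PySem.List.sorted xs (fun p => p.1) true =
      pvBlocks xs (PySem.List.sorted (PySem.Set.ofList (xs.map Prod.fst)) (fun k => k) true) := by
  induction xs using List.reverseRecOn with
  | nil => rfl
  | append_singleton ys x ih =>
      have hK_perm : (PySem.List.sorted (PySem.Set.ofList (ys.map Prod.fst)) (fun k => k) true).Perm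
          (PySem.Set.ofList (ys.map Prod.fst)) := PySem.List.sorted_perm _ _ _
      have hnodup : (PySem.List.sorted (PySem.Set.ofList (ys.map Prod.fst)) (fun k => k) true).Nodup :=
        hK_perm.nodup_iff.mpr (PySem.Set.nodup_ofList _)
      have hdesc : (PySem.List.sorted (PySem.Set.ofList (ys.map Prod.fst)) (fun k => k) true).Pairwise
          (fun a b => b < a) :=
        ((PySem.List.sorted_pairwise_rev (PySem.Set.ofList (ys.map Prod.fst)) (fun k => k)).and
          hnodup).imp (fun h => lt_of_le_of_ne h.1 h.2.symm)
      have hmem_iff : ∀ z : String,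
          z ∈ PySem.List.sorted (PySem.Set.ofList (ys.map Prod.fst)) (fun k => k) true ↔
            z ∈ ys.map Prod.fst :=
        fun z => hK_perm.mem_iff.trans (PySem.Set.mem_ofList _ _)
      have hnew : x.1 ∉ PySem.List.sorted (PySem.Set.ofList (ys.map Prod.fst)) (fun k => k) true →
          ys.filter (fun p => p.1 == x.1) = [] := by
        intro h
        refine List.filter_eq_nil_iff.mpr (fun p hp => ?_)
        have : p.1 ≠ x.1 :=
          fun e => h ((hmem_iff x.1).mpr (List.mem_map.mpr ⟨p, hp, e⟩))
        simpa using this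
      have hsortstep : PySem.List.sorted (ys ++ [x]) (fun p => p.1) true
          = PySem.List.insertBy (fun a b : String × Int => decide (b.1 < a.1)) x
              (PySem.List.sorted ys (fun p => p.1) true) := by
        rw [PySem.List.sorted_rev_eq_foldl_insertBy, PySem.List.sorted_rev_eq_foldl_insertBy,
          List.foldl_append, List.foldl_cons, List.foldl_nil]
      rw [hsortstep, ih,
        pvInsertBy_blocks ys x (PySem.List.sorted (PySem.Set.ofList (ys.map Prod.fst)) (fun k => k) true)
          hdesc hnew]
      by_cases hm : x.1 ∈ PySem.List.sorted (PySem.Set.ofList (ys.map Prod.fst)) (fun k => k) true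
      · rw [if_pos hm]
        have hkeq : PySem.Set.ofList ((ys ++ [x]).map Prod.fst) = PySem.Set.ofList (ys.map Prod.fst) := by
          simp only [List.map_append, List.map_cons, List.map_nil]
          rw [PySem.Set.ofList_append_singleton,
            PySem.Set.add_of_mem ((PySem.Set.mem_ofList _ _).mpr ((hmem_iff x.1).mp hm))]
        rw [hkeq]
      · rw [if_neg hm]
        have hm' : x.1 ∉ PySem.Set.ofList (ys.map Prod.fst) :=
          fun h => hm (hK_perm.mem_iff.mpr h)
        have hkeystep : PySem.List.sorted (PySem.Set.ofList ((ys ++ [x]).map Prod.fst)) (fun k => k) true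
            = PySem.List.insertBy (fun a b : String => decide (b < a)) x.1
                (PySem.List.sorted (PySem.Set.ofList (ys.map Prod.fst)) (fun k => k) true) := by
          simp only [List.map_append, List.map_cons, List.map_nil]
          rw [PySem.Set.ofList_append_singleton, PySem.Set.add_of_not_mem hm',
            PySem.List.sorted_rev_eq_foldl_insertBy, PySem.List.sorted_rev_eq_foldl_insertBy,
            List.foldl_append, List.foldl_cons, List.foldl_nil]
        rw [hkeystep]

lemma pvFold_run (l : List (String × Int)) (k : String) (hl : ∀ p ∈ l, p.1 = k)
    (d : PySem.Dict String (List (List Int))) (cur : List Int) :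
    l.foldl pvStep (d, some (k, cur)) = (d, some (k, cur ++ l.map (fun p => p.2))) := by
  induction l generalizing cur with
  | nil => simp
  | cons p l ih =>
      have hp : p.1 = k := hl p (by simp)
      rw [List.foldl_cons]
      show List.foldl pvStep (pvStep (d, some (k, cur)) p) l = _
      rw [show pvStep (d, some (k, cur)) p = (d, some (k, cur ++ [p.2])) by
        simp [pvStep, hp]]
      rw [ih (fun q hq => hl q (by simp [hq]))]
      simp

lemma pvFold_run_start (l : List (String × Int)) (k : String) (hl : ∀ p ∈ l, p.1 = k)
    (hne : l ≠ []) (d : PySem.Dict String (List (List Int)))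
    (pend : Option (String × List Int)) (hpend : ∀ pe, pend = some pe → pe.1 ≠ k) :
    l.foldl pvStep (d, pend) = (pvFlush (d, pend), some (k, l.map (fun p => p.2))) := by
  cases l with
  | nil => exact absurd rfl hne
  | cons p l =>
      have hp : p.1 = k := hl p (by simp)
      rw [List.foldl_cons]
      cases pend with
      | none =>
          rw [show pvStep (d, none) p = (d, some (p.1, [p.2])) from rfl, hp,
            pvFold_run l k (fun q hq => hl q (by simp [hq]))]
          simp [pvFlush]
      | some pe =>
          have hne' : (p.1 == pe.1) = false := by
            simpa [hp] using (hpend pe rfl).symm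
          rw [show pvStep (d, some pe) p
              = (d.modify pe.1 [] (fun l => l ++ [pe.2]), some (p.1, [p.2])) by
            simp [pvStep, hne'], hp,
            pvFold_run l k (fun q hq => hl q (by simp [hq]))]
          simp [pvFlush]

lemma pvFold_blocks (xs : List (String × Int)) (ks : List String)
    (hdesc : ks.Pairwise (fun a b => b < a))
    (hocc : ∀ k ∈ ks, xs.filter (fun p => p.1 == k) ≠ [])
    (d : PySem.Dict String (List (List Int))) (pend : Option (String × List Int))
    (hpend : ∀ pe, pend = some pe → pe.1 ∉ ks) :
    pvFlush ((pvBlocks xs ks).foldl pvStep (d, pend)) =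
      ks.foldl (fun nd k => nd.modify k [] (fun l =>
        l ++ [(xs.filter (fun p => p.1 == k)).map (fun p => p.2)])) (pvFlush (d, pend)) := by
  induction ks generalizing d pend with
  | nil => rfl
  | cons k ks ih =>
      simp only [pvBlocks, List.flatMap_cons] at *
      rw [List.foldl_append,
        pvFold_run_start (xs.filter (fun p => p.1 == k)) k
          (fun p hp => by simpa using (List.mem_filter.mp hp).2)
          (hocc k (by simp)) d pend
          (fun pe hpe => fun hk => (hpend pe hpe) (by simp [hk])),
        ih hdesc.tail (fun k' hk' => hocc k' (by simp [hk'])) (pvFlush (d, pend))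
          (some (k, (xs.filter (fun p => p.1 == k)).map (fun p => p.2)))
          (fun pe hpe hk => by
            cases hpe
            exact absurd (List.rel_of_pairwise_cons hdesc (by simpa using hk)) (lt_irrefl k)),
        List.foldl_cons]
      rfl

-- ===== VERDICT (by name: the statement is the Claim_ definition above) =====
theorem new_roll_dict_spec : Claim_equal_new_roll_dict := by
  intro roll_list _
  show new_roll_dict roll_list = new_roll_dict_alt roll_list
  have hK_perm : (PySem.List.sorted (PySem.Set.ofList (roll_list.map Prod.fst)) (fun k => k) true).Perm
      (PySem.Set.ofList (roll_list.map Prod.fst)) := PySem.List.sorted_perm _ _ _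
  have hdesc : (PySem.List.sorted (PySem.Set.ofList (roll_list.map Prod.fst)) (fun k => k) true).Pairwise
      (fun a b => b < a) :=
    ((PySem.List.sorted_pairwise_rev _ (fun k => k)).and
      (hK_perm.nodup_iff.mpr (PySem.Set.nodup_ofList _))).imp (fun h => lt_of_le_of_ne h.1 h.2.symm)
  have hocc : ∀ k ∈ PySem.List.sorted (PySem.Set.ofList (roll_list.map Prod.fst)) (fun k => k) true,
      roll_list.filter (fun p => p.1 == k) ≠ [] := by
    intro k hk hnil
    obtain ⟨p, hp, hpk⟩ := List.mem_map.mp ((PySem.Set.mem_ofList _ _).mp (hK_perm.mem_iff.mp hk))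
    have hmem : p ∈ roll_list.filter (fun p => p.1 == k) :=
      List.mem_filter.mpr ⟨hp, by simp [hpk]⟩
    rw [hnil] at hmem
    exact List.not_mem_nil hmem
  have hB : new_roll_dict_alt roll_list =
      ((PySem.List.sorted (PySem.Set.ofList (roll_list.map Prod.fst)) (fun k => k) true).foldl
        (fun nd k => nd.modify k [] (fun l =>
          l ++ [(roll_list.filter (fun p => p.1 == k)).map (fun p => p.2)])) PySem.Dict.empty).items := by
    show (pvFlush ((PySem.List.sorted roll_list (fun p => p.1) true).foldl pvStep
        (PySem.Dict.empty, none))).items = _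
    rw [pvSorted_blocks roll_list,
      pvFold_blocks roll_list _ hdesc hocc PySem.Dict.empty none (fun pe h => nomatch h)]
    rfl
  rw [hB]
  show ((PySem.List.sorted
      (roll_list.foldl (fun d i => d.modify i.1 [] (fun l => l ++ [i.2])) PySem.Dict.empty).keys
      (fun x => x) true).foldl
      (fun nd k => nd.modify k [] (fun l => l ++
        [(roll_list.foldl (fun d i => d.modify i.1 [] (fun l => l ++ [i.2])) PySem.Dict.empty).getD k []]))
      PySem.Dict.empty).items = _
  have hkeys : (roll_list.foldl (fun d i => d.modify i.1 [] (fun l => l ++ [i.2])) PySem.Dict.empty).keys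
      = PySem.Set.ofList (roll_list.map Prod.fst) := by
    rw [PySem.Dict.keys_foldl_modify_key, PySem.Dict.keys_empty, PySem.Set.update_eq_foldl,
      ← PySem.Set.ofList_eq_foldl]
  rw [hkeys]
  rw [PySem.List.foldl_congr_mem _ _
      (fun nd k => nd.modify k [] (fun l =>
        l ++ [(roll_list.filter (fun p => p.1 == k)).map (fun p => p.2)])) _
      (fun acc k _ => by rw [PySem.Dict.getD_foldl_modify_append]; simp)]
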